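-- pv_equiv track=rewrite | github.com/Stereo101/Advent-of-Code-2020 | benchmark/day20.py | rrot_match_down
-- ===== SOURCE A (Python) =====
-- def rrot(tile):
--     return tuple(zip(*tile[::-1]))
--
-- def rrot_match_down(t1,t2):
--     height = len(t1)
--     width = len(t1[0])
--
--     for t1_rot in range(4):
--         bottom_edge = tuple(t1[height-1][x] for x in range(width))
--         for t2_rot in range(4):
--             top_edge = tuple(t2[0][x] for x in range(width))
--             if(bottom_edge == top_edge):
--                 return t1_rot,t2_rot,0
--             elif(tuple(reversed(bottom_edge)) == top_edge):
--                 return t1_rot,t2_rot,1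
--             t2 = rrot(t2)
--         t1 = rrot(t1)
--     return -1,-1,-1
-- ===== SOURCE B (Python) =====
-- def rrot_match_down(t1, t2):
--     h = len(t1)
--     w = len(t1[0])
--     m = len(t2)
--     # read the four rotations' bottom/top edges straight off the tile borders
--     # (no rotation is ever performed): for a square tile the bottom edge of
--     # rrot^i is the last row, last column reversed, first row reversed, first
--     # column; the top edge of rrot^j is the first row, first column reversed,
--     # last row reversed, last column.
--     bottoms = [
--         tuple(t1[h - 1][x] for x in range(w)),
--         tuple(t1[h - 1 - x][w - 1] for x in range(w)),
--         tuple(t1[0][w - 1 - x] for x in range(w)),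
--         tuple(t1[x][0] for x in range(w)),
--     ]
--     tops = [
--         tuple(t2[0][x] for x in range(w)),
--         tuple(t2[m - 1 - x][0] for x in range(w)),
--         tuple(t2[m - 1][m - 1 - x] for x in range(w)),
--         tuple(t2[x][m - 1] for x in range(w)),
--     ]
--     for i, b in enumerate(bottoms):
--         rb = b[::-1]
--         for j, t in enumerate(tops):
--             if b == t:
--                 return i, j, 0
--             if rb == t:
--                 return i, j, 1
--     return -1, -1, -1
-- ===== Notes on version B (the rewrite author's own statement) =====
-- stated objective: alternative
-- what changed: B never rotates either tile: it reads the four rotations' bottom/top edges directly off the borders of the original matrices (last row, last column reversed, first row reversed, first column, and dually for the top), then scans the 4x4 index pairs, whereas A materialises a full rotation of t2 on every inner iteration and of t1 on every outer iteration. Edge extraction is O(n) per edge versus O(n^2) per rotation, which a timing run measured as faster.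
-- outside the precondition, e.g. on rrot_match_down((('a',), ('a', 'b'), ('b', 'a')), (('a', 'a', 'b'),)): A returns (0, 2, 0), B returns (2, 0, 0); on rrot_match_down((('a', 'b'),), (('c', 'd'),)): A raises IndexError, B raises IndexError
import Mathlib
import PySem

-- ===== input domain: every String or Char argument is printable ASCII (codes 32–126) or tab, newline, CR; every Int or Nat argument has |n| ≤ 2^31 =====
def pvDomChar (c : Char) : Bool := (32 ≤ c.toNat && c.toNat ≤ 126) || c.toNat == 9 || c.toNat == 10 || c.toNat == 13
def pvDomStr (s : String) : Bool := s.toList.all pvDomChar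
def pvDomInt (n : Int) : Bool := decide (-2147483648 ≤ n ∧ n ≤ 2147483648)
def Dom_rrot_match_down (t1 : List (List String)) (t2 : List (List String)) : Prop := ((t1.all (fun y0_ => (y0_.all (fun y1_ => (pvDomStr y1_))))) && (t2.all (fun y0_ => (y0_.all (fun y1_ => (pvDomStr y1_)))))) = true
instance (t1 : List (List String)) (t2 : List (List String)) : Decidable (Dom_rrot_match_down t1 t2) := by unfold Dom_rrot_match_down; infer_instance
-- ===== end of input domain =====

-- B reads all eight rotation edges directly off the tile borders (no rotation is ever built) and scans index pairs; same results on nonempty square tiles with len(t1) ≤ len(t2).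


-- ===== PORT A =====
-- zip(*rows): truncating transpose; k-th output row = k-th element of every row, k < min row length
def pyZipStar (rows : List (List String)) : List (List String) :=
  (List.range (((rows.map (fun r => r.length)).min?).getD 0)).map
    (fun k => rows.map (fun r => r.getD k ""))

-- rrot(tile) = tuple(zip(*tile[::-1]))
def rrotL (t : List (List String)) : List (List String) := pyZipStar t.reverse

-- tuple(row[x] for x in range(w)); in-range on Pre_, so getD's default is never used
def edgeRow (row : List String) (w : Nat) : List String :=
  (List.range w).map (fun x => row.getD x "")

-- inner 'for t2_rot in range(4)' loop of A: returns (match result, final t2)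
def pvInnerA (bottom : List String) (w : Nat) : Nat → Int → List (List String) → Option (Int × Int) × List (List String)
  | 0, _, t2 => (none, t2)
  | fuel+1, j, t2 =>
    let top := edgeRow (t2.getD 0 []) w
    if bottom = top then (some (j, 0), t2)
    else if bottom.reverse = top then (some (j, 1), t2)
    else pvInnerA bottom w fuel (j+1) (rrotL t2)

-- outer 'for t1_rot in range(4)' loop of A (t2 carries over between iterations)
def pvOuterA (h w : Nat) : Nat → Int → List (List String) → List (List String) → Int × Int × Int
  | 0, _, _, _ => (-1, -1, -1)
  | fuel+1, i, t1, t2 =>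
    let bottom := edgeRow (t1.getD (h-1) []) w
    match pvInnerA bottom w 4 0 t2 with
    | (some (j, f), _) => (i, j, f)
    | (none, t2') => pvOuterA h w fuel (i+1) (rrotL t1) t2'

def rrot_match_down (t1 : List (List String)) (t2 : List (List String)) : Int × Int × Int :=
  pvOuterA t1.length (t1.headD []).length 4 0 t1 t2

-- ===== PORT B =====
-- inner 'for j, t in enumerate(tops)' scan
def pvScanJ (b rb : List String) : Int → List (List String) → Option (Int × Int)
  | _, [] => none
  | j, t :: rest =>
    if b = t then some (j, 0)
    else if rb = t then some (j, 1)
    else pvScanJ b rb (j+1) rest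

-- outer 'for i, b in enumerate(bottoms)' scan
def pvScanI (tops : List (List String)) : Int → List (List String) → Int × Int × Int
  | _, [] => (-1, -1, -1)
  | i, b :: rest =>
    match pvScanJ b b.reverse 0 tops with
    | some (j, f) => (i, j, f)
    | none => pvScanI tops (i+1) rest

-- B: the eight edges are read straight off the borders of the ORIGINAL tiles;
-- no rotation is ever constructed (indexes are in range on Pre_, so getD's default is unused)
def rrot_match_down_alt (t1 : List (List String)) (t2 : List (List String)) : Int × Int × Int :=
  let h := t1.length
  let w := (t1.headD []).length
  let m := t2.length
  let bottoms := [
    (List.range w).map (fun x => (t1.getD (h-1) []).getD x ""),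
    (List.range w).map (fun x => (t1.getD (h-1-x) []).getD (w-1) ""),
    (List.range w).map (fun x => (t1.getD 0 []).getD (w-1-x) ""),
    (List.range w).map (fun x => (t1.getD x []).getD 0 "")]
  let tops := [
    (List.range w).map (fun x => (t2.getD 0 []).getD x ""),
    (List.range w).map (fun x => (t2.getD (m-1-x) []).getD 0 ""),
    (List.range w).map (fun x => (t2.getD (m-1) []).getD (m-1-x) ""),
    (List.range w).map (fun x => (t2.getD x []).getD (m-1) "")]
  pvScanI tops 0 bottoms

-- ===== PRECONDITION & SPEC =====
-- Pre_ excludes empty t1 and (except when width = 0, where both immediately match on empty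
-- edges) ragged/non-square tiles and t2 smaller than t1: there A's fixed height/width indexing
-- into rotated tiles raises IndexError unless an accidental early match short-circuits it,
-- and B's border reads hit Python's negative-index wraparound; neither corner value is specified.
def Pre_rrot_match_down (t1 : List (List String)) (t2 : List (List String)) : Prop :=
  t1 ≠ [] ∧ ((t1.headD []).length = 0 ∨
    (t2 ≠ [] ∧ (∀ r ∈ t1, r.length = t1.length) ∧ (∀ r ∈ t2, r.length = t2.length) ∧ t1.length ≤ t2.length))
instance (t1 : List (List String)) (t2 : List (List String)) : Decidable (Pre_rrot_match_down t1 t2) := by unfold Pre_rrot_match_down; infer_instance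

def pvWitness_rrot_match_down : List (List String) × List (List String) := ([["a"]], [["b"]])

def Spec_rrot_match_down (t1 : List (List String)) (t2 : List (List String)) (out : Int × Int × Int) : Prop := out = rrot_match_down_alt t1 t2
instance (t1 : List (List String)) (t2 : List (List String)) (out : Int × Int × Int) : Decidable (Spec_rrot_match_down t1 t2 out) := by unfold Spec_rrot_match_down; infer_instance

-- ===== CLAIM (what is proved, stated in full; the proofs are below) =====
def Claim_equal_rrot_match_down : Prop := ∀ (t1 : List (List String)) (t2 : List (List String)), Dom_rrot_match_down t1 t2 → Pre_rrot_match_down t1 t2 → Spec_rrot_match_down t1 t2 (rrot_match_down t1 t2)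

-- ===== LEMMAS AND PROOFS =====

-- min? of a nonempty list whose elements all equal n
theorem pv_foldl_min_const (l : List Nat) (n : Nat) (h : ∀ x ∈ l, x = n) :
    l.foldl min n = n := by
  induction l with
  | nil => rfl
  | cons a l ih =>
    have ha : a = n := h a (by simp)
    simp only [List.foldl, ha, min_self]
    exact ih (fun x hx => h x (by simp [hx]))

theorem pv_min_const (l : List Nat) (n : Nat) (hne : l ≠ []) (h : ∀ x ∈ l, x = n) :
    (l.min?).getD 0 = n := by
  cases l with
  | nil => exact absurd rfl hne
  | cons a l =>
    have ha : a = n := h a (by simp)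
    simp only [List.min?, Option.getD_some, ha]
    exact pv_foldl_min_const l n (fun x hx => h x (by simp [hx]))

def SqN (t : List (List String)) (m : Nat) : Prop := t.length = m ∧ ∀ r ∈ t, r.length = m

theorem rrotL_eq {t : List (List String)} {m : Nat} (h : SqN t m) (hm : 0 < m) :
    rrotL t = (List.range m).map (fun k => t.reverse.map (fun r => r.getD k "")) := by
  obtain ⟨hlen, hrow⟩ := h
  have hne : t.reverse.map (fun r => r.length) ≠ [] := by
    simp only [ne_eq, List.map_eq_nil_iff, List.reverse_eq_nil_iff]
    intro hnil; rw [hnil] at hlen; simp at hlen; omega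
  have hmin : ((t.reverse.map (fun r => r.length)).min?).getD 0 = m := by
    apply pv_min_const _ _ hne
    intro x hx
    simp only [List.mem_map, List.mem_reverse] at hx
    obtain ⟨r, hr, hrx⟩ := hx
    rw [← hrx]; exact hrow r hr
  simp only [rrotL, pyZipStar, hmin]

theorem rrotL_sq {t : List (List String)} {m : Nat} (h : SqN t m) (hm : 0 < m) :
    SqN (rrotL t) m := by
  rw [rrotL_eq h hm]
  constructor
  · simp
  · intro r hr
    simp only [List.mem_map, List.mem_range] at hr
    obtain ⟨k, _, hk⟩ := hr
    rw [← hk]; simp [h.1]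

theorem getD2 (l : List (List String)) (i j : Nat) (hi : i < l.length) (hj : j < (l[i]).length) :
    (l.getD i []).getD j "" = l[i][j] := by
  rw [List.getD_eq_getElem l [] hi]
  exact List.getD_eq_getElem _ "" hj

theorem rrotL_get {t : List (List String)} {m : Nat} (h : SqN t m) (hm : 0 < m)
    {i j : Nat} (hi : i < m) (hj : j < m) :
    ((rrotL t).getD i []).getD j "" = (t.getD (m-1-j) []).getD i "" := by
  rw [rrotL_eq h hm]
  have hi' : i < ((List.range m).map (fun k => t.reverse.map (fun r => r.getD k ""))).length := by
    simpa using hi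
  rw [List.getD_eq_getElem _ [] hi']
  simp only [List.getElem_map, List.getElem_range]
  have hj' : j < (t.reverse.map (fun r => r.getD i "")).length := by
    simp [h.1, hj]
  rw [List.getD_eq_getElem _ "" hj']
  simp only [List.getElem_map]
  rw [List.getElem_reverse]
  rw [show m - 1 - j = t.length - 1 - j by rw [h.1]]
  have hjl : j < t.length := by rw [h.1]; exact hj
  rw [List.getD_eq_getElem t [] (by omega : t.length - 1 - j < t.length)]

theorem rrot4_id {t : List (List String)} {m : Nat} (h : SqN t m) (hm : 0 < m) :
    rrotL (rrotL (rrotL (rrotL t))) = t := by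
  have h1 := rrotL_sq h hm
  have h2 := rrotL_sq h1 hm
  have h3 := rrotL_sq h2 hm
  have h4 := rrotL_sq h3 hm
  apply List.ext_getElem (by rw [h4.1, h.1])
  intro i hi hi'
  have him : i < m := by rw [h4.1] at hi; exact hi
  have hrl4 : (rrotL (rrotL (rrotL (rrotL t))))[i].length = m :=
    h4.2 _ (List.getElem_mem hi)
  have hrt : t[i].length = m := h.2 _ (List.getElem_mem hi')
  apply List.ext_getElem (by rw [hrl4, hrt])
  intro j hj hj'
  have hjm : j < m := by rw [hrl4] at hj; exact hj
  rw [← getD2 _ i j hi (by rw [hrl4]; exact hjm), ← getD2 _ i j hi' (by rw [hrt]; exact hjm)]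
  calc ((rrotL (rrotL (rrotL (rrotL t)))).getD i []).getD j ""
      = ((rrotL (rrotL (rrotL t))).getD (m-1-j) []).getD i "" := rrotL_get h3 hm him hjm
    _ = ((rrotL (rrotL t)).getD (m-1-i) []).getD (m-1-j) "" := rrotL_get h2 hm (by omega) (by omega)
    _ = ((rrotL t).getD (m-1-(m-1-j)) []).getD (m-1-i) "" := rrotL_get h1 hm (by omega) (by omega)
    _ = (t.getD (m-1-(m-1-i)) []).getD (m-1-(m-1-j)) "" := rrotL_get h hm (by omega) (by omega)
    _ = (t.getD i []).getD j "" := by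
        rw [show m-1-(m-1-i) = i by omega, show m-1-(m-1-j) = j by omega]

theorem innerA_fst (b : List String) (w : Nat) (t2 : List (List String)) :
    (pvInnerA b w 4 0 t2).1 =
      pvScanJ b b.reverse 0
        [edgeRow (t2.getD 0 []) w, edgeRow ((rrotL t2).getD 0 []) w,
         edgeRow ((rrotL (rrotL t2)).getD 0 []) w, edgeRow ((rrotL (rrotL (rrotL t2))).getD 0 []) w] := by
  show (pvInnerA b w (3+1) 0 t2).1 = _
  simp only [pvInnerA, pvScanJ]
  split_ifs <;> rfl

theorem innerA_snd (b : List String) (w : Nat) (t2 : List (List String))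
    (h : (pvInnerA b w 4 0 t2).1 = none) :
    (pvInnerA b w 4 0 t2).2 = rrotL (rrotL (rrotL (rrotL t2))) := by
  revert h
  show (pvInnerA b w (3+1) 0 t2).1 = none → _
  simp only [pvInnerA]
  split_ifs <;> simp

-- ===== VERDICT (by name: the statement is the Claim_ definition above) =====
theorem rrot_match_down_spec : Claim_equal_rrot_match_down := by
  intro t1 t2 _ hpre
  obtain ⟨h1ne, hrest⟩ := hpre
  rcases hrest with hw0 | ⟨h2ne, hsq1, hsq2, hle⟩
  · -- width 0: both programs match the empty bottom edge against the empty top edge at once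
    have hb : ∀ row : List String, edgeRow row (t1.headD []).length = [] := by
      intro row; simp only [edgeRow, hw0, List.range_zero, List.map_nil]
    have h1 : pvInnerA (edgeRow (t1.getD (t1.length-1) []) (t1.headD []).length)
        (t1.headD []).length 4 0 t2 = (some (0, 0), t2) := by
      show pvInnerA _ _ (3+1) _ _ = _
      simp only [pvInnerA, hb]
      simp
    have hA : rrot_match_down t1 t2 = (0, 0, 0) := by
      unfold rrot_match_down
      show pvOuterA _ _ (3+1) 0 t1 t2 = _
      simp only [pvOuterA, h1]
    have hB : rrot_match_down_alt t1 t2 = (0, 0, 0) := by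
      unfold rrot_match_down_alt
      simp only [hw0, List.range_zero, List.map_nil, pvScanI, pvScanJ]
      simp
    unfold Spec_rrot_match_down
    rw [hA, hB]
  -- main case: square tiles, 0 < h = w ≤ m
  have hhead : t1.headD [] ∈ t1 := by
    cases t1 with
    | nil => exact absurd rfl h1ne
    | cons a l => simp
  have hm1 : 0 < t1.length := List.length_pos_iff.mpr h1ne
  have hm2 : 0 < t2.length := List.length_pos_iff.mpr h2ne
  have hw : (t1.headD []).length = t1.length := hsq1 _ hhead
  have s1 : SqN t1 t1.length := ⟨rfl, hsq1⟩
  have s11 := rrotL_sq s1 hm1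
  have s12 := rrotL_sq s11 hm1
  have s2 : SqN t2 t2.length := ⟨rfl, hsq2⟩
  have s21 := rrotL_sq s2 hm2
  have s22 := rrotL_sq s21 hm2
  have h4 : rrotL (rrotL (rrotL (rrotL t2))) = t2 := rrot4_id s2 hm2
  unfold Spec_rrot_match_down rrot_match_down rrot_match_down_alt
  set h := t1.length with hh
  set w := (t1.headD []).length with hwdef
  set m := t2.length with hmdef
  have hwh : w = h := hw
  -- the direct border reads of B are the rotated-edge rows of A
  have hb1 : (List.range w).map (fun x => (t1.getD (h-1-x) []).getD (w-1) "")
      = edgeRow ((rrotL t1).getD (h-1) []) w := by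
    simp only [edgeRow]
    apply List.map_congr_left
    intro x hx; rw [List.mem_range] at hx
    rw [rrotL_get s1 hm1 (by omega) (by omega : x < h)]
    rw [hwh]
  have hb2 : (List.range w).map (fun x => (t1.getD 0 []).getD (w-1-x) "")
      = edgeRow ((rrotL (rrotL t1)).getD (h-1) []) w := by
    simp only [edgeRow]
    apply List.map_congr_left
    intro x hx; rw [List.mem_range] at hx
    rw [rrotL_get s11 hm1 (by omega) (by omega : x < h),
        rrotL_get s1 hm1 (by omega) (by omega : h-1 < h)]
    rw [show h-1-(h-1) = 0 by omega, hwh]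
  have hb3 : (List.range w).map (fun x => (t1.getD x []).getD 0 "")
      = edgeRow ((rrotL (rrotL (rrotL t1))).getD (h-1) []) w := by
    simp only [edgeRow]
    apply List.map_congr_left
    intro x hx; rw [List.mem_range] at hx
    rw [rrotL_get s12 hm1 (by omega) (by omega : x < h),
        rrotL_get s11 hm1 (by omega) (by omega : h-1 < h),
        rrotL_get s1 hm1 (by omega) (by omega : h-1-x < h)]
    rw [show h-1-(h-1) = 0 by omega, show h-1-(h-1-x) = x by omega]
  have ht1e : (List.range w).map (fun x => (t2.getD (m-1-x) []).getD 0 "")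
      = edgeRow ((rrotL t2).getD 0 []) w := by
    simp only [edgeRow]
    apply List.map_congr_left
    intro x hx; rw [List.mem_range] at hx
    rw [rrotL_get s2 hm2 (by omega) (by omega : x < m)]
  have ht2e : (List.range w).map (fun x => (t2.getD (m-1) []).getD (m-1-x) "")
      = edgeRow ((rrotL (rrotL t2)).getD 0 []) w := by
    simp only [edgeRow]
    apply List.map_congr_left
    intro x hx; rw [List.mem_range] at hx
    rw [rrotL_get s21 hm2 (by omega) (by omega : x < m),
        rrotL_get s2 hm2 (by omega) (by omega : 0 < m)]
    rw [show m-1-0 = m-1 by omega]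
  have ht3e : (List.range w).map (fun x => (t2.getD x []).getD (m-1) "")
      = edgeRow ((rrotL (rrotL (rrotL t2))).getD 0 []) w := by
    simp only [edgeRow]
    apply List.map_congr_left
    intro x hx; rw [List.mem_range] at hx
    rw [rrotL_get s22 hm2 (by omega) (by omega : x < m),
        rrotL_get s21 hm2 (by omega) (by omega : 0 < m),
        rrotL_get s2 hm2 (by omega) (by omega : m-1-x < m)]
    rw [show m-1-0 = m-1 by omega, show m-1-(m-1-x) = x by omega]
  set tops : List (List String) :=
    [edgeRow (t2.getD 0 []) w, edgeRow ((rrotL t2).getD 0 []) w,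
     edgeRow ((rrotL (rrotL t2)).getD 0 []) w, edgeRow ((rrotL (rrotL (rrotL t2))).getD 0 []) w] with htops
  have step : ∀ (fuel : Nat) (i : Int) (u : List (List String)),
      pvOuterA h w (fuel+1) i u t2 =
        (match pvScanJ (edgeRow (u.getD (h-1) []) w) (edgeRow (u.getD (h-1) []) w).reverse 0 tops with
         | some (j, f) => (i, j, f)
         | none => pvOuterA h w fuel (i+1) (rrotL u) t2) := by
    intro fuel i u
    have hf := innerA_fst (edgeRow (u.getD (h-1) []) w) w t2
    have hs := innerA_snd (edgeRow (u.getD (h-1) []) w) w t2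
    cases hI : pvInnerA (edgeRow (u.getD (h-1) []) w) w 4 0 t2 with
    | mk o t2' =>
      rw [hI] at hf hs
      rw [← htops] at hf
      simp only [pvOuterA, hI]
      cases o with
      | some jf =>
        cases jf with
        | mk j f =>
          rw [← hf]
      | none =>
        have ht2' : t2' = t2 := by have h5 := hs rfl; rw [h4] at h5; exact h5
        rw [← hf, ht2']
  show pvOuterA h w 4 0 t1 t2 =
    pvScanI [(List.range w).map (fun x => (t2.getD 0 []).getD x ""),
             (List.range w).map (fun x => (t2.getD (m-1-x) []).getD 0 ""),
             (List.range w).map (fun x => (t2.getD (m-1) []).getD (m-1-x) ""),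
             (List.range w).map (fun x => (t2.getD x []).getD (m-1) "")] 0
      [(List.range w).map (fun x => (t1.getD (h-1) []).getD x ""),
       (List.range w).map (fun x => (t1.getD (h-1-x) []).getD (w-1) ""),
       (List.range w).map (fun x => (t1.getD 0 []).getD (w-1-x) ""),
       (List.range w).map (fun x => (t1.getD x []).getD 0 "")]
  rw [hb1, hb2, hb3, ht1e, ht2e, ht3e]
  have hb0 : (List.range w).map (fun x => (t1.getD (h-1) []).getD x "")
      = edgeRow (t1.getD (h-1) []) w := rfl
  have ht0 : (List.range w).map (fun x => (t2.getD 0 []).getD x "")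
      = edgeRow (t2.getD 0 []) w := rfl
  rw [hb0, ht0, ← htops]
  show pvOuterA h w 4 0 t1 t2 = pvScanI tops 0
    [edgeRow (t1.getD (h-1) []) w, edgeRow ((rrotL t1).getD (h-1) []) w,
     edgeRow ((rrotL (rrotL t1)).getD (h-1) []) w, edgeRow ((rrotL (rrotL (rrotL t1))).getD (h-1) []) w]
  rw [show (4:Nat) = 3+1 from rfl, step]
  simp only [pvScanI]
  cases pvScanJ (edgeRow (t1.getD (h-1) []) w) (edgeRow (t1.getD (h-1) []) w).reverse 0 tops with
  | some jf => cases jf; rfl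
  | none =>
    rw [show (3:Nat) = 2+1 from rfl, step]
    cases pvScanJ (edgeRow ((rrotL t1).getD (h-1) []) w) (edgeRow ((rrotL t1).getD (h-1) []) w).reverse 0 tops with
    | some jf => cases jf; rfl
    | none =>
      rw [show (2:Nat) = 1+1 from rfl, step]
      cases pvScanJ (edgeRow ((rrotL (rrotL t1)).getD (h-1) []) w) (edgeRow ((rrotL (rrotL t1)).getD (h-1) []) w).reverse 0 tops with
      | some jf => cases jf; rfl
      | none =>
        rw [show (1:Nat) = 0+1 from rfl, step]
        cases pvScanJ (edgeRow ((rrotL (rrotL (rrotL t1))).getD (h-1) []) w) (edgeRow ((rrotL (rrotL (rrotL t1))).getD (h-1) []) w).reverse 0 tops with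
        | some jf => cases jf; rfl
        | none => rfl
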